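-- pv_equiv track=rewrite | github.com/tennyson-mccalla/SuperNavigator | navigator-main/skills/product-design/functions/token_extractor.py | normalize_token_name
-- ===== SOURCE A (Python) =====
-- def normalize_token_name(figma_name: str) -> str:
--     """
--     Normalize Figma variable name to DTCG semantic naming.
--
--     Examples:
--         "Primary 500" → "color.primary.500"
--         "Spacing MD" → "spacing.md"
--         "Font Heading Large" → "typography.heading.large"
--
--     Args:
--         figma_name: Original Figma variable name
--
--     Returns:
--         Normalized DTCG token path
--     """
--     name = figma_name.strip()
--
--     # Convert to lowercase and split
--     parts = name.lower().replace('-', ' ').replace('_', ' ').split()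
--
--     # Detect token type from name
--     if any(keyword in parts for keyword in ['color', 'colour']):
--         token_type = 'color'
--         parts = [p for p in parts if p not in ['color', 'colour']]
--     elif any(keyword in parts for keyword in ['spacing', 'space', 'gap', 'padding', 'margin']):
--         token_type = 'spacing'
--         parts = [p for p in parts if p not in ['spacing', 'space', 'gap', 'padding', 'margin']]
--     elif any(keyword in parts for keyword in ['font', 'typography', 'text']):
--         token_type = 'typography'
--         parts = [p for p in parts if p not in ['font', 'typography', 'text']]
--     elif any(keyword in parts for keyword in ['radius', 'border']):
--         token_type = 'radius'
--         parts = [p for p in parts if p not in ['radius', 'border']]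
--     elif any(keyword in parts for keyword in ['shadow', 'elevation']):
--         token_type = 'shadow'
--         parts = [p for p in parts if p not in ['shadow', 'elevation']]
--     else:
--         # Infer from first part
--         first_part = parts[0] if parts else ''
--         if first_part in ['primary', 'secondary', 'success', 'error', 'warning', 'info']:
--             token_type = 'color'
--         elif first_part in ['xs', 'sm', 'md', 'lg', 'xl', '2xl', '3xl']:
--             token_type = 'spacing'
--         else:
--             token_type = 'other'
--
--     # Build token path
--     if parts:
--         return f"{token_type}.{'.'.join(parts)}"
--     else:
--         return token_type
-- ===== SOURCE B (Python) =====
-- KEYWORD_PRIO = {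
--     'color': 0, 'colour': 0,
--     'spacing': 1, 'space': 1, 'gap': 1, 'padding': 1, 'margin': 1,
--     'font': 2, 'typography': 2, 'text': 2,
--     'radius': 3, 'border': 3,
--     'shadow': 4, 'elevation': 4,
-- }
-- TYPE_NAMES = ('color', 'spacing', 'typography', 'radius', 'shadow')
-- COLOR_FIRST = ('primary', 'secondary', 'success', 'error', 'warning', 'info')
-- SPACING_FIRST = ('xs', 'sm', 'md', 'lg', 'xl', '2xl', '3xl')
--
--
-- def normalize_token_name(figma_name: str) -> str:
--     parts = figma_name.strip().lower().replace('-', ' ').replace('_', ' ').split()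
--     # one pass: the best (smallest-priority) type keyword seen anywhere in parts
--     best = None
--     for p in parts:
--         g = KEYWORD_PRIO.get(p)
--         if g is not None and (best is None or g < best):
--             best = g
--     if best is not None:
--         token_type = TYPE_NAMES[best]
--         parts = [p for p in parts if KEYWORD_PRIO.get(p) != best]
--     else:
--         first = parts[0] if parts else ''
--         if first in COLOR_FIRST:
--             token_type = 'color'
--         elif first in SPACING_FIRST:
--             token_type = 'spacing'
--         else:
--             token_type = 'other'
--     return '.'.join([token_type] + parts)
-- ===== Notes on version B (the rewrite author's own statement) =====
-- stated objective: alternative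
-- what changed: Replaces A's five sequential keyword-group scans (elif chain, each scanning parts against a group list) by a keyword-to-priority dictionary and a single pass over parts computing the minimum priority, then one filter dropping the winning priority's keywords.
import Mathlib
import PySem

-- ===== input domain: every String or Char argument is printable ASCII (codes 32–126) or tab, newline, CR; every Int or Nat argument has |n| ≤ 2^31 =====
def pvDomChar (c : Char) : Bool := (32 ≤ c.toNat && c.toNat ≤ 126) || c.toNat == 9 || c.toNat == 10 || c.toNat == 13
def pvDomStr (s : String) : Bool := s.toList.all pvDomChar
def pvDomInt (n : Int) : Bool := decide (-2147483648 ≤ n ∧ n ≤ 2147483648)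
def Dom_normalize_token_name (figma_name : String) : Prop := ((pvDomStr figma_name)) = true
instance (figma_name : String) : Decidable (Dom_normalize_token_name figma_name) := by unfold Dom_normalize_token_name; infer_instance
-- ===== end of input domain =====

-- B replaces A's five sequential keyword-group scans by a keyword→priority dictionary,
-- one pass over the parts keeping the minimum priority, and one filter (objective: alternative).


-- ===== PORT A =====
def normalize_token_name (figma_name : String) : String :=
  let name := PySem.Str.strip figma_name
  let parts := PySem.Str.split₀ (PySem.Str.replace (PySem.Str.replace (PySem.Str.lower name) "-" " ") "_" " ")
  let tp : String × List String :=
    if (["color", "colour"] : List String).any (fun k => parts.contains k) then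
      ("color", parts.filter (fun p => !(["color", "colour"] : List String).contains p))
    else if (["spacing", "space", "gap", "padding", "margin"] : List String).any (fun k => parts.contains k) then
      ("spacing", parts.filter (fun p => !(["spacing", "space", "gap", "padding", "margin"] : List String).contains p))
    else if (["font", "typography", "text"] : List String).any (fun k => parts.contains k) then
      ("typography", parts.filter (fun p => !(["font", "typography", "text"] : List String).contains p))
    else if (["radius", "border"] : List String).any (fun k => parts.contains k) then
      ("radius", parts.filter (fun p => !(["radius", "border"] : List String).contains p))
    else if (["shadow", "elevation"] : List String).any (fun k => parts.contains k) then
      ("shadow", parts.filter (fun p => !(["shadow", "elevation"] : List String).contains p))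
    else
      let first_part := parts.headD ""
      if (["primary", "secondary", "success", "error", "warning", "info"] : List String).contains first_part then
        ("color", parts)
      else if (["xs", "sm", "md", "lg", "xl", "2xl", "3xl"] : List String).contains first_part then
        ("spacing", parts)
      else
        ("other", parts)
  -- f"{token_type}.{'.'.join(parts)}" ported as a join of the three pieces (exact concatenation)
  if tp.2.isEmpty then tp.1
  else PySem.Str.join "" [tp.1, ".", PySem.Str.join "." tp.2]

-- ===== PORT B =====
-- KEYWORD_PRIO literal dict (distinct keys, insertion order)
def pvKwPrio : PySem.Dict String Nat :=
  PySem.Dict.mk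
    [("color", 0), ("colour", 0),
     ("spacing", 1), ("space", 1), ("gap", 1), ("padding", 1), ("margin", 1),
     ("font", 2), ("typography", 2), ("text", 2),
     ("radius", 3), ("border", 3),
     ("shadow", 4), ("elevation", 4)]

def pvTypeNames : List String := ["color", "spacing", "typography", "radius", "shadow"]
def pvColorFirst : List String := ["primary", "secondary", "success", "error", "warning", "info"]
def pvSpacingFirst : List String := ["xs", "sm", "md", "lg", "xl", "2xl", "3xl"]

-- the loop body: keep the smaller priority (none = nothing seen yet)
def pvBestStep (best : Option Nat) (p : String) : Option Nat :=
  match PySem.Dict.get? pvKwPrio p with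
  | none => best
  | some g =>
    match best with
    | none => some g
    | some b => if g < b then some g else some b

def normalize_token_name_alt (figma_name : String) : String :=
  let parts := PySem.Str.split₀ (PySem.Str.replace (PySem.Str.replace (PySem.Str.lower (PySem.Str.strip figma_name)) "-" " ") "_" " ")
  match parts.foldl pvBestStep none with
  | some best =>
      PySem.Str.join "." (pvTypeNames.getD best "" ::
        parts.filter (fun p => !(PySem.Dict.get? pvKwPrio p == some best)))
  | none =>
      let first := parts.headD ""
      let token_type :=
        if pvColorFirst.contains first then "color"
        else if pvSpacingFirst.contains first then "spacing"
        else "other"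
      PySem.Str.join "." (token_type :: parts)

-- ===== PRECONDITION & SPEC =====
def Spec_normalize_token_name (figma_name : String) (out : String) : Prop := out = normalize_token_name_alt figma_name
instance (figma_name : String) (out : String) : Decidable (Spec_normalize_token_name figma_name out) := by unfold Spec_normalize_token_name; infer_instance

-- ===== CLAIM (what is proved, stated in full; the proofs are below) =====
def Claim_equal_normalize_token_name : Prop := ∀ (figma_name : String), Dom_normalize_token_name figma_name → Spec_normalize_token_name figma_name (normalize_token_name figma_name)

-- ===== LEMMAS AND PROOFS =====

theorem pvNodup : (pvKwPrio).keys.Nodup := by decide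

theorem pvPrioP0 (p : String) : PySem.Dict.get? pvKwPrio p = some 0 ↔ p = "color" ∨ p = "colour" := by
  rw [PySem.Dict.get?_eq_some_iff_mem_items pvKwPrio p 0 pvNodup]
  simp [pvKwPrio, List.mem_cons, Prod.mk.injEq]

theorem pvPrioB0 (p : String) : (PySem.Dict.get? pvKwPrio p == some 0) = (["color", "colour"] : List String).contains p := by
  rw [Bool.eq_iff_iff, beq_iff_eq, List.contains_iff_mem]
  simpa using pvPrioP0 p

theorem pvPrioP1 (p : String) : PySem.Dict.get? pvKwPrio p = some 1 ↔ p = "spacing" ∨ p = "space" ∨ p = "gap" ∨ p = "padding" ∨ p = "margin" := by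
  rw [PySem.Dict.get?_eq_some_iff_mem_items pvKwPrio p 1 pvNodup]
  simp [pvKwPrio, List.mem_cons, Prod.mk.injEq]

theorem pvPrioB1 (p : String) : (PySem.Dict.get? pvKwPrio p == some 1) = (["spacing", "space", "gap", "padding", "margin"] : List String).contains p := by
  rw [Bool.eq_iff_iff, beq_iff_eq, List.contains_iff_mem]
  simpa using pvPrioP1 p

theorem pvPrioP2 (p : String) : PySem.Dict.get? pvKwPrio p = some 2 ↔ p = "font" ∨ p = "typography" ∨ p = "text" := by
  rw [PySem.Dict.get?_eq_some_iff_mem_items pvKwPrio p 2 pvNodup]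
  simp [pvKwPrio, List.mem_cons, Prod.mk.injEq]

theorem pvPrioB2 (p : String) : (PySem.Dict.get? pvKwPrio p == some 2) = (["font", "typography", "text"] : List String).contains p := by
  rw [Bool.eq_iff_iff, beq_iff_eq, List.contains_iff_mem]
  simpa using pvPrioP2 p

theorem pvPrioP3 (p : String) : PySem.Dict.get? pvKwPrio p = some 3 ↔ p = "radius" ∨ p = "border" := by
  rw [PySem.Dict.get?_eq_some_iff_mem_items pvKwPrio p 3 pvNodup]
  simp [pvKwPrio, List.mem_cons, Prod.mk.injEq]

theorem pvPrioB3 (p : String) : (PySem.Dict.get? pvKwPrio p == some 3) = (["radius", "border"] : List String).contains p := by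
  rw [Bool.eq_iff_iff, beq_iff_eq, List.contains_iff_mem]
  simpa using pvPrioP3 p

theorem pvPrioP4 (p : String) : PySem.Dict.get? pvKwPrio p = some 4 ↔ p = "shadow" ∨ p = "elevation" := by
  rw [PySem.Dict.get?_eq_some_iff_mem_items pvKwPrio p 4 pvNodup]
  simp [pvKwPrio, List.mem_cons, Prod.mk.injEq]

theorem pvPrioB4 (p : String) : (PySem.Dict.get? pvKwPrio p == some 4) = (["shadow", "elevation"] : List String).contains p := by
  rw [Bool.eq_iff_iff, beq_iff_eq, List.contains_iff_mem]
  simpa using pvPrioP4 p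

theorem pvPrio_cases (p : String) :
    PySem.Dict.get? pvKwPrio p = none ∨ ∃ j, j ≤ 4 ∧ PySem.Dict.get? pvKwPrio p = some j := by
  cases h : PySem.Dict.get? pvKwPrio p with
  | none => exact Or.inl rfl
  | some j =>
    refine Or.inr ⟨j, ?_, rfl⟩
    have hm := (PySem.Dict.get?_eq_some_iff_mem_items pvKwPrio p j pvNodup).mp h
    simp [pvKwPrio, Prod.mk.injEq] at hm
    rcases hm with ⟨-, rfl⟩ | ⟨-, rfl⟩ | ⟨-, rfl⟩ | ⟨-, rfl⟩ | ⟨-, rfl⟩ | ⟨-, rfl⟩ | ⟨-, rfl⟩ | ⟨-, rfl⟩ | ⟨-, rfl⟩ | ⟨-, rfl⟩ | ⟨-, rfl⟩ | ⟨-, rfl⟩ | ⟨-, rfl⟩ | ⟨-, rfl⟩ <;> norm_num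
def pvHasK (j : Nat) (parts : List String) : Bool :=
  parts.any (fun p => PySem.Dict.get? pvKwPrio p == some j)

def pvChain (parts : List String) : Option Nat :=
  if pvHasK 0 parts then some 0
  else if pvHasK 1 parts then some 1
  else if pvHasK 2 parts then some 2
  else if pvHasK 3 parts then some 3
  else if pvHasK 4 parts then some 4
  else none

def pvOmin : Option Nat → Option Nat → Option Nat
  | none, x => x
  | some b, none => some b
  | some b, some g => some (min b g)

theorem pvOmin_none_right (b : Option Nat) : pvOmin b none = b := by
  cases b <;> rfl

theorem pvOmin_assoc (a b c : Option Nat) : pvOmin (pvOmin a b) c = pvOmin a (pvOmin b c) := by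
  cases a <;> cases b <;> cases c <;> simp [pvOmin, Nat.min_assoc]

theorem pvBestStep_eq (b : Option Nat) (p : String) :
    pvBestStep b p = pvOmin b (PySem.Dict.get? pvKwPrio p) := by
  unfold pvBestStep
  cases PySem.Dict.get? pvKwPrio p with
  | none => exact (pvOmin_none_right b).symm
  | some g =>
    cases b with
    | none => rfl
    | some b' =>
      simp only [pvOmin]
      split_ifs with h
      · simp [Nat.min_eq_right (Nat.le_of_lt h)]  -- min b' g = g
      · simp [Nat.min_eq_left (Nat.le_of_not_lt h)]

theorem pvChain_cons (p : String) (rest : List String) :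
    pvChain (p :: rest) = pvOmin (PySem.Dict.get? pvKwPrio p) (pvChain rest) := by
  rcases pvPrio_cases p with h | ⟨j, hj, h⟩
  · unfold pvChain pvHasK
    simp only [List.any_cons, h]
    simp [pvOmin]
  · unfold pvChain pvHasK
    simp only [List.any_cons, h]
    interval_cases j <;> simp <;> split_ifs <;> rfl

theorem pvFold_eq (parts : List String) (b : Option Nat) :
    parts.foldl pvBestStep b = pvOmin b (pvChain parts) := by
  induction parts generalizing b with
  | nil => simp [List.foldl_nil, pvChain, pvHasK, pvOmin_none_right]
  | cons p rest ih =>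
    rw [List.foldl_cons, pvBestStep_eq, ih, pvChain_cons, pvOmin_assoc]

theorem pvBest_eq_chain (parts : List String) :
    parts.foldl pvBestStep none = pvChain parts := by
  rw [pvFold_eq]; rfl
theorem pvHasK_eq (j : Nat) (ks : List String)
    (h : ∀ p, (PySem.Dict.get? pvKwPrio p == some j) = ks.contains p) (parts : List String) :
    ks.any (fun k => parts.contains k) = pvHasK j parts := by
  unfold pvHasK
  rw [Bool.eq_iff_iff]
  simp only [List.any_eq_true, List.contains_iff_mem]
  constructor
  · rintro ⟨k, hk, hmem⟩
    exact ⟨k, hmem, by rw [h k]; exact List.contains_iff_mem.mpr hk⟩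
  · rintro ⟨p, hp, hlook⟩
    exact ⟨p, List.contains_iff_mem.mp (by rw [← h p]; exact hlook), hp⟩

theorem pvJoinEq (t : String) (ps : List String) :
    (if ps.isEmpty then t else PySem.Str.join "" [t, ".", PySem.Str.join "." ps])
      = PySem.Str.join "." (t :: ps) := by
  cases ps with
  | nil =>
    simp [PySem.Str.join, PySem.Chars.join_singleton]
  | cons q rest =>
    simp only [List.isEmpty_cons, if_neg Bool.false_ne_true, PySem.Str.join]
    apply congrArg String.ofList
    simp [PySem.Chars.join_cons_cons, PySem.Chars.join_singleton]

theorem pvCore (parts : List String) :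
    (let tp : String × List String :=
      if (["color", "colour"] : List String).any (fun k => parts.contains k) then
        ("color", parts.filter (fun p => !(["color", "colour"] : List String).contains p))
      else if (["spacing", "space", "gap", "padding", "margin"] : List String).any (fun k => parts.contains k) then
        ("spacing", parts.filter (fun p => !(["spacing", "space", "gap", "padding", "margin"] : List String).contains p))
      else if (["font", "typography", "text"] : List String).any (fun k => parts.contains k) then
        ("typography", parts.filter (fun p => !(["font", "typography", "text"] : List String).contains p))
      else if (["radius", "border"] : List String).any (fun k => parts.contains k) then
        ("radius", parts.filter (fun p => !(["radius", "border"] : List String).contains p))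
      else if (["shadow", "elevation"] : List String).any (fun k => parts.contains k) then
        ("shadow", parts.filter (fun p => !(["shadow", "elevation"] : List String).contains p))
      else
        let first_part := parts.headD ""
        if (["primary", "secondary", "success", "error", "warning", "info"] : List String).contains first_part then
          ("color", parts)
        else if (["xs", "sm", "md", "lg", "xl", "2xl", "3xl"] : List String).contains first_part then
          ("spacing", parts)
        else
          ("other", parts)
      if tp.2.isEmpty then tp.1
      else PySem.Str.join "" [tp.1, ".", PySem.Str.join "." tp.2])
    =
    (match parts.foldl pvBestStep none with
     | some best =>
        PySem.Str.join "." (pvTypeNames.getD best "" ::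
          parts.filter (fun p => !(PySem.Dict.get? pvKwPrio p == some best)))
     | none =>
        let first := parts.headD ""
        let token_type :=
          if pvColorFirst.contains first then "color"
          else if pvSpacingFirst.contains first then "spacing"
          else "other"
        PySem.Str.join "." (token_type :: parts)) := by
  rw [pvBest_eq_chain,
      pvHasK_eq 0 _ pvPrioB0 parts, pvHasK_eq 1 _ pvPrioB1 parts, pvHasK_eq 2 _ pvPrioB2 parts,
      pvHasK_eq 3 _ pvPrioB3 parts, pvHasK_eq 4 _ pvPrioB4 parts]
  unfold pvChain
  split_ifs with h0 h1 h2 h3 h4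
  · show _ = PySem.Str.join "." ("color" :: parts.filter (fun p => !(PySem.Dict.get? pvKwPrio p == some 0)))
    rw [show parts.filter (fun p => !(PySem.Dict.get? pvKwPrio p == some 0))
          = parts.filter (fun p => !(["color", "colour"] : List String).contains p) from
        List.filter_congr (fun p _ => by rw [pvPrioB0]), ← pvJoinEq]
  · show _ = PySem.Str.join "." ("spacing" :: parts.filter (fun p => !(PySem.Dict.get? pvKwPrio p == some 1)))
    rw [show parts.filter (fun p => !(PySem.Dict.get? pvKwPrio p == some 1))
          = parts.filter (fun p => !(["spacing", "space", "gap", "padding", "margin"] : List String).contains p) from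
        List.filter_congr (fun p _ => by rw [pvPrioB1]), ← pvJoinEq]
  · show _ = PySem.Str.join "." ("typography" :: parts.filter (fun p => !(PySem.Dict.get? pvKwPrio p == some 2)))
    rw [show parts.filter (fun p => !(PySem.Dict.get? pvKwPrio p == some 2))
          = parts.filter (fun p => !(["font", "typography", "text"] : List String).contains p) from
        List.filter_congr (fun p _ => by rw [pvPrioB2]), ← pvJoinEq]
  · show _ = PySem.Str.join "." ("radius" :: parts.filter (fun p => !(PySem.Dict.get? pvKwPrio p == some 3)))
    rw [show parts.filter (fun p => !(PySem.Dict.get? pvKwPrio p == some 3))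
          = parts.filter (fun p => !(["radius", "border"] : List String).contains p) from
        List.filter_congr (fun p _ => by rw [pvPrioB3]), ← pvJoinEq]
  · show _ = PySem.Str.join "." ("shadow" :: parts.filter (fun p => !(PySem.Dict.get? pvKwPrio p == some 4)))
    rw [show parts.filter (fun p => !(PySem.Dict.get? pvKwPrio p == some 4))
          = parts.filter (fun p => !(["shadow", "elevation"] : List String).contains p) from
        List.filter_congr (fun p _ => by rw [pvPrioB4]), ← pvJoinEq]
  · rw [← pvJoinEq]
    simp only [pvColorFirst, pvSpacingFirst]
    split_ifs <;> rfl

-- ===== VERDICT (by name: the statement is the Claim_ definition above) =====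
theorem normalize_token_name_spec : Claim_equal_normalize_token_name := by
  intro figma_name _
  unfold Spec_normalize_token_name normalize_token_name normalize_token_name_alt
  simp only []
  generalize (PySem.Str.split₀ (PySem.Str.replace (PySem.Str.replace
      (PySem.Str.lower (PySem.Str.strip figma_name)) "-" " ") "_" " ")) = parts
  exact pvCore parts
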